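-- pv_equiv track=rewrite | github.com/pypi-data/pypi-mirror-275 | packages/gecko-soho/gecko_soho-0.0.8.tar.gz/gecko_soho-0.0.8/src/gecko/transform.py | slice_img_indexes
-- ===== SOURCE A (Python) =====
-- def slice_img_indexes(img_height, num_threads):
--     res = []
--     for i in range(num_threads):
--         for j in range(num_threads):
--             res.append([
--                 i*img_height//num_threads, (i+1)*img_height//num_threads,
--                 j*img_height//num_threads, (j+1)*img_height//num_threads
--             ])
--     return res
-- ===== SOURCE B (Python) =====
-- def slice_img_indexes(img_height, num_threads):
--     n = num_threads
--     if n <= 0: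
--         return []
--     # Bresenham-style accumulation: one divmod total, boundaries built incrementally
--     q, r = divmod(img_height, n)
--     bounds = [0]
--     b = 0
--     s = 0
--     for _ in range(n):
--         b += q
--         s += r
--         if s >= n:
--             b += 1
--             s -= n
--         bounds.append(b)
--     # single flat pass over the n*n cells, decoding (row, col) with divmod
--     res = []
--     for k in range(n * n):
--         i, j = divmod(k, n)
--         res.append([bounds[i], bounds[i + 1], bounds[j], bounds[j + 1]])
--     return res
-- ===== Notes on version B (the rewrite author's own statement) =====
-- stated objective: alternative
-- what changed: B replaces A's nested loops with four floor divisions per cell by a Bresenham-style incremental accumulation that builds all boundaries with a single divmod (no division in the loop), followed by one flat pass over the n*n cell indices decoded with divmod(k, n).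
import Mathlib
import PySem

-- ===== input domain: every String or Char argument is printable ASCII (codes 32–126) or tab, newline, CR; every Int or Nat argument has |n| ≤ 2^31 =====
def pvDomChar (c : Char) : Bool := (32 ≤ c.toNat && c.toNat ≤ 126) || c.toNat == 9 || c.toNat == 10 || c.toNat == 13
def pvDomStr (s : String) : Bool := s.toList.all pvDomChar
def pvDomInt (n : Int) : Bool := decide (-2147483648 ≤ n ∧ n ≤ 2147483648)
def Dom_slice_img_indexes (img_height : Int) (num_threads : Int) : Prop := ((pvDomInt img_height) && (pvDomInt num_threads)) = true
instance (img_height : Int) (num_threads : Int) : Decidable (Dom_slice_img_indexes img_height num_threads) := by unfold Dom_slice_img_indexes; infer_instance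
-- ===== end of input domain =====

-- B builds the n+1 slice boundaries by Bresenham-style incremental accumulation (one divmod
-- total instead of four floor divisions per cell) and emits the n*n cells in one flat pass
-- decoding (row, col) with divmod(k, n); alternative algorithm, same asymptotic cost.


-- ===== PORT A =====
def slice_img_indexes (img_height : Int) (num_threads : Int) : List (List Int) :=
  (PySem.List.pyRange 0 num_threads 1).foldl (fun res i =>
    (PySem.List.pyRange 0 num_threads 1).foldl (fun res j =>
      res ++ [[PySem.Int.floordiv (i * img_height) num_threads,
               PySem.Int.floordiv ((i + 1) * img_height) num_threads,
               PySem.Int.floordiv (j * img_height) num_threads,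
               PySem.Int.floordiv ((j + 1) * img_height) num_threads]]) res) []

-- ===== PORT B =====
-- the body of Source B's first loop (state: bounds list, current boundary b, remainder accumulator s)
def sliceStep (q r n : Int) (st : List Int × Int × Int) : List Int × Int × Int :=
  if n ≤ st.2.2 + r then (st.1 ++ [st.2.1 + q + 1], st.2.1 + q + 1, st.2.2 + r - n)
  else (st.1 ++ [st.2.1 + q], st.2.1 + q, st.2.2 + r)

-- Source B's first loop: the boundary table built by accumulation (q, r = divmod(img_height, n))
def sliceBounds (img_height : Int) (n : Int) : List Int :=
  ((PySem.List.pyRange 0 n 1).foldl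
    (fun st _ => sliceStep (PySem.Int.floordiv img_height n) (PySem.Int.mod img_height n) n st)
    ([0], 0, 0)).1

def slice_img_indexes_alt (img_height : Int) (num_threads : Int) : List (List Int) :=
  if num_threads ≤ 0 then []
  else
    -- flat pass over the n*n cells; i, j = divmod(k, n); bounds[i] is always in range, pyGetD is exact
    (PySem.List.pyRange 0 (num_threads * num_threads) 1).foldl (fun res k =>
      res ++ [[PySem.List.pyGetD (sliceBounds img_height num_threads) (PySem.Int.floordiv k num_threads) 0,
               PySem.List.pyGetD (sliceBounds img_height num_threads) (PySem.Int.floordiv k num_threads + 1) 0,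
               PySem.List.pyGetD (sliceBounds img_height num_threads) (PySem.Int.mod k num_threads) 0,
               PySem.List.pyGetD (sliceBounds img_height num_threads) (PySem.Int.mod k num_threads + 1) 0]]) []

-- ===== PRECONDITION & SPEC =====
def Spec_slice_img_indexes (img_height : Int) (num_threads : Int) (out : List (List Int)) : Prop := out = slice_img_indexes_alt img_height num_threads
instance (img_height : Int) (num_threads : Int) (out : List (List Int)) : Decidable (Spec_slice_img_indexes img_height num_threads out) := by unfold Spec_slice_img_indexes; infer_instance

-- ===== CLAIM (what is proved, stated in full; the proofs are below) =====
def Claim_equal_slice_img_indexes : Prop := ∀ (img_height : Int) (num_threads : Int), Dom_slice_img_indexes img_height num_threads → Spec_slice_img_indexes img_height num_threads (slice_img_indexes img_height num_threads)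

-- ===== LEMMAS AND PROOFS =====

-- floor division / remainder of a*n + t for 0 ≤ t < n
theorem fdivmod_decomp (n a t : Int) (hn : 0 < n) (ht0 : 0 ≤ t) (htn : t < n) :
    PySem.Int.floordiv (a * n + t) n = a ∧ PySem.Int.mod (a * n + t) n = t := by
  have hd : PySem.Int.floordiv (a * n + t) n = a := by
    rw [PySem.Int.floordiv_eq_iff_of_pos hn]
    constructor
    · nlinarith
    · nlinarith
  refine ⟨hd, ?_⟩
  have hx := PySem.Int.floordiv_mul_add_mod (a * n + t) n
  rw [hd] at hx
  linarith

-- the Bresenham fold builds exactly the boundary table k*img_height//n for k = 0..m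
theorem bres_fold (h n : Int) (hn : 0 < n) (m : Nat) :
    (PySem.List.pyRange 0 (m : Int) 1).foldl
      (fun st _ => sliceStep (PySem.Int.floordiv h n) (PySem.Int.mod h n) n st) ([0], 0, 0)
    = ((PySem.List.pyRange 0 ((m : Int) + 1) 1).map (fun k => PySem.Int.floordiv (k * h) n),
       PySem.Int.floordiv ((m : Int) * h) n, PySem.Int.mod ((m : Int) * h) n) := by
  induction m with
  | zero =>
      simp [PySem.List.pyRange_one_eq_nil (le_refl (0:Int)), PySem.List.pyRange_one,
        List.range_succ, PySem.Int.floordiv, PySem.Int.mod]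
  | succ m ih =>
      have hcast : ((m + 1 : Nat) : Int) = (m : Int) + 1 := by push_cast; ring
      rw [hcast, PySem.List.pyRange_one_succ_right (by positivity), List.foldl_append, ih]
      simp only [List.foldl_cons, List.foldl_nil]
      have hq := PySem.Int.floordiv_mul_add_mod h n
      have hm := PySem.Int.floordiv_mul_add_mod ((m : Int) * h) n
      have hr0 := PySem.Int.mod_nonneg h hn
      have hrn := PySem.Int.mod_lt h hn
      have hs0 := PySem.Int.mod_nonneg ((m : Int) * h) hn
      have hsn := PySem.Int.mod_lt ((m : Int) * h) hn
      set q := PySem.Int.floordiv h n with hqdef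
      set r := PySem.Int.mod h n with hrdef
      set b := PySem.Int.floordiv ((m : Int) * h) n with hbdef
      set s := PySem.Int.mod ((m : Int) * h) n with hsdef
      have key : ((m : Int) + 1) * h = (b + q) * n + (s + r) := by linear_combination -hm - hq
      rw [PySem.List.pyRange_one_succ_right (by positivity : (0:Int) ≤ (m : Int) + 1),
        List.map_append]
      unfold sliceStep
      by_cases hc : n ≤ s + r
      · have harg : ((m : Int) + 1) * h = (b + q + 1) * n + (s + r - n) := by linear_combination key
        have hd := fdivmod_decomp n (b + q + 1) (s + r - n) hn (by omega) (by omega)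
        have hdiv : PySem.Int.floordiv (((m : Int) + 1) * h) n = b + q + 1 := by rw [harg]; exact hd.1
        have hmod : PySem.Int.mod (((m : Int) + 1) * h) n = s + r - n := by rw [harg]; exact hd.2
        simp [hc, hdiv, hmod]
      · have hd := fdivmod_decomp n (b + q) (s + r) hn (by omega) (by omega)
        have hdiv : PySem.Int.floordiv (((m : Int) + 1) * h) n = b + q := by rw [key]; exact hd.1
        have hmod : PySem.Int.mod (((m : Int) + 1) * h) n = s + r := by rw [key]; exact hd.2
        simp [hc, hdiv, hmod]

-- the flat pass over the m*n cell indices, decoded with divmod, is the nested i/j grid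
theorem grid_decode (n : Int) (hn : 0 < n) (g : Int → Int) (m : Nat) :
    (PySem.List.pyRange 0 ((m : Int) * n) 1).map (fun k =>
      [g (PySem.Int.floordiv k n), g (PySem.Int.floordiv k n + 1),
       g (PySem.Int.mod k n), g (PySem.Int.mod k n + 1)])
    = (PySem.List.pyRange 0 (m : Int) 1).flatMap (fun i =>
        (PySem.List.pyRange 0 n 1).map (fun j => [g i, g (i + 1), g j, g (j + 1)])) := by
  induction m with
  | zero => simp [PySem.List.pyRange_one_eq_nil (le_refl (0:Int))]
  | succ m ih =>
      have hcast : ((m + 1 : Nat) : Int) = (m : Int) + 1 := by push_cast; ring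
      have h1 : (0:Int) ≤ (m : Int) * n := mul_nonneg (by positivity) hn.le
      have h2 : (m : Int) * n ≤ ((m : Int) + 1) * n := by nlinarith
      rw [hcast, PySem.List.pyRange_one_append 0 ((m : Int) * n) (((m : Int) + 1) * n) h1 h2,
        List.map_append, ih,
        PySem.List.pyRange_one_succ_right (by positivity : (0:Int) ≤ (m : Int)),
        List.flatMap_append]
      congr 1
      simp only [List.flatMap_cons, List.flatMap_nil, List.append_nil]
      apply List.ext_getElem
      · have hlen : ((m : Int) + 1) * n - (m : Int) * n = n := by ring
        simp [PySem.List.length_pyRange_one, hlen]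
      · intro t hL hR
        have htn : (t : Int) < n := by
          have := hR
          simp only [List.length_map, PySem.List.length_pyRange_one] at this
          omega
        simp only [List.getElem_map, PySem.List.getElem_pyRange_one]
        have hd := fdivmod_decomp n (m : Int) (t : Int) hn (by positivity) htn
        rw [hd.1, hd.2]
        norm_num

theorem bounds_eq (h n : Int) (hn : 0 < n) :
    sliceBounds h n
      = (PySem.List.pyRange 0 (n + 1) 1).map (fun k => PySem.Int.floordiv (k * h) n) := by
  have hcast : ((n.toNat : Nat) : Int) = n := Int.toNat_of_nonneg hn.le
  have hb := bres_fold h n hn n.toNat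
  rw [hcast] at hb
  unfold sliceBounds
  rw [hb]

theorem slice_img_indexes_eq (img_height num_threads : Int) :
    slice_img_indexes img_height num_threads = slice_img_indexes_alt img_height num_threads := by
  unfold slice_img_indexes slice_img_indexes_alt
  by_cases ht : num_threads ≤ 0
  · simp [ht, PySem.List.pyRange_one_eq_nil (by omega : num_threads ≤ (0:Int))]
  · have hn : 0 < num_threads := by omega
    rw [if_neg ht]
    -- turn both append-loops into map / flatMap form
    simp only [PySem.List.foldl_append_singleton_eq_map, PySem.List.foldl_append_eq_flatMap,
      List.nil_append]
    -- B side: flat divmod pass = nested grid, boundary table = the k*h//n values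
    have hcast : ((num_threads.toNat : Nat) : Int) = num_threads := Int.toNat_of_nonneg hn.le
    have hgrid := grid_decode num_threads hn
      (fun x => PySem.List.pyGetD (sliceBounds img_height num_threads) x 0) num_threads.toNat
    rw [hcast] at hgrid
    rw [hgrid]
    apply List.flatMap_congr
    intro i hi
    apply List.map_congr_left
    intro j hj
    rw [PySem.List.mem_pyRange_one] at hi hj
    rw [bounds_eq img_height num_threads hn,
      PySem.List.pyGetD_map_pyRange_of_nonneg _ _ _ _ (by omega) (by omega),
      PySem.List.pyGetD_map_pyRange_of_nonneg _ _ _ _ (by omega) (by omega),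
      PySem.List.pyGetD_map_pyRange_of_nonneg _ _ _ _ (by omega) (by omega),
      PySem.List.pyGetD_map_pyRange_of_nonneg _ _ _ _ (by omega) (by omega)]

-- ===== VERDICT (by name: the statement is the Claim_ definition above) =====
theorem slice_img_indexes_spec : Claim_equal_slice_img_indexes := by
  intro h t _
  exact slice_img_indexes_eq h t
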